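-- pv_equiv track=rewrite | github.com/Thubaleth/V1-python | python-basics/decomposition_pattern/decomposition_pattern_A/funny_phrase.py | funny_phrase
-- ===== SOURCE A (Python) =====
-- def double_vowel(str):
--     new_str = ""
--     for ch in str:
--         if ch in "aeiou":
--             new_str += ch *2
--         else:
--             new_str += ch
--
--     return new_str
--
-- def funny_phrase(sentence):
--     new_sentence = sentence.split()
--     new_list =[]
--     for i in range(len(new_sentence)):
--
--         if i % 2 == 0:
--             new_list.append(new_sentence[i])
--         else:
--             new_word = double_vowel(new_sentence[i])
--             new_list.append(new_word)
--
--     return " ".join(new_list)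
-- ===== SOURCE B (Python) =====
-- def funny_phrase(sentence):
--     # One streaming pass over the characters: no split/join, no per-word pass.
--     # State: are we inside a word, and how many words have started (parity
--     # decides vowel doubling); whitespace runs collapse to a single separator.
--     out = []
--     in_word = False
--     words = 0
--     for ch in sentence:
--         if ch.isspace():
--             in_word = False
--         else:
--             if not in_word:
--                 if words:
--                     out.append(" ")
--                 in_word = True
--                 words += 1
--             if words % 2 == 0 and ch in "aeiou":
--                 out.append(ch)
--             out.append(ch)
--     return "".join(out)
-- ===== Notes on version B (the rewrite author's own statement) =====
-- stated objective: alternative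
-- what changed: Replaces split-into-words / per-word vowel-doubling / join with a single streaming pass over the characters that tracks an in-word flag and a started-word counter, collapsing whitespace runs to one separator and doubling vowels when the word counter's parity says so.
import Mathlib
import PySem

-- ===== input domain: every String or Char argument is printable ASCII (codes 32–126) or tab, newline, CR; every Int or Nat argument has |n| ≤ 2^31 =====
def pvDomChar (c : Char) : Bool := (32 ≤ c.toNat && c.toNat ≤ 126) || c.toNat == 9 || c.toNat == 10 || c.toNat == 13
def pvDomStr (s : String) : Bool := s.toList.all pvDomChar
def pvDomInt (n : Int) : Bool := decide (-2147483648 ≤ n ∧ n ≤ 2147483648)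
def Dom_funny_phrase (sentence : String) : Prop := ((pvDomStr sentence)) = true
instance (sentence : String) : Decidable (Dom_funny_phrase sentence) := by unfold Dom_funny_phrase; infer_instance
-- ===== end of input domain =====

-- B replaces A's split / per-word double_vowel / join pipeline by a single streaming pass
-- over the characters with an in-word flag and a word counter (alternative decomposition, same cost).

-- ===== PORT A =====
-- 'new_str += ch*2 / += ch' transliterated over List Char (exact: Python string append = list append of chars)
def double_vowel (s : String) : String :=
  String.ofList (s.toList.foldl
    (fun new_str ch =>
      if "aeiou".toList.contains ch then new_str ++ [ch, ch] else new_str ++ [ch]) [])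

def funny_phrase (sentence : String) : String :=
  let new_sentence := PySem.Str.split₀ sentence
  let new_list := (PySem.List.pyRange 0 (PySem.List.len new_sentence) 1).foldl
    (fun acc i =>
      if PySem.Int.mod i 2 == 0 then
        acc ++ [PySem.List.pyGetD new_sentence i ""]
      else
        acc ++ [double_vowel (PySem.List.pyGetD new_sentence i "")]) []
  PySem.Str.join " " new_list

-- ===== PORT B =====
-- one step of Source B's loop body on the state (out, in_word, words)
def pvStep (st : List Char × Bool × Nat) (ch : Char) : List Char × Bool × Nat :=
  match st with
  | (out, in_word, words) =>
    if PySem.Chars.isspace ch then (out, false, words)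
    else
      let out1 := if in_word = false then (if words ≠ 0 then out ++ [' '] else out) else out
      let words1 := if in_word = false then words + 1 else words
      let out2 := if words1 % 2 = 0 ∧ "aeiou".toList.contains ch then out1 ++ [ch] else out1
      (out2 ++ [ch], true, words1)

def funny_phrase_alt (sentence : String) : String :=
  String.ofList (sentence.toList.foldl pvStep ([], false, 0)).1

-- ===== PRECONDITION & SPEC =====
def Spec_funny_phrase (sentence : String) (out : String) : Prop := out = funny_phrase_alt sentence
instance (sentence : String) (out : String) : Decidable (Spec_funny_phrase sentence out) := by unfold Spec_funny_phrase; infer_instance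

-- ===== CLAIM (what is proved, stated in full; the proofs are below) =====
def Claim_equal_funny_phrase : Prop := ∀ (sentence : String), Dom_funny_phrase sentence → Spec_funny_phrase sentence (funny_phrase sentence)

-- ===== LEMMAS AND PROOFS =====

-- per-character vowel doubling, the common denominator of both programs
def pvDV (w : List Char) : List Char :=
  w.flatMap (fun c => if "aeiou".toList.contains c then [c, c] else [c])

-- word number k (0-based) is doubled iff k is odd
def pvProc (k : Nat) (w : List Char) : List Char := if k % 2 = 1 then pvDV w else w

-- processed words, indexed from k
def pvRen : Nat → List (List Char) → List (List Char)
  | _, [] => []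
  | k, w :: ws => pvProc k w :: pvRen (k + 1) ws

-- the joined output of the processed words starting at index k; sep = "a word was already emitted"
def pvJoin : Nat → Bool → List (List Char) → List Char
  | _, _, [] => []
  | k, sep, w :: ws => (if sep then [' '] else []) ++ pvProc k w ++ pvJoin (k + 1) true ws

mutual
-- (rest of current word, following words) of a character stream read inside a word
def pvFirst : List Char → List Char × List (List Char)
  | [] => ([], [])
  | c :: rest =>
      if PySem.Chars.isspace c then ([], pvWords rest)
      else (c :: (pvFirst rest).1, (pvFirst rest).2)
-- the whitespace-separated words of a character stream (= Python str.split())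
def pvWords : List Char → List (List Char)
  | [] => []
  | c :: rest =>
      if PySem.Chars.isspace c then pvWords rest
      else (c :: (pvFirst rest).1) :: (pvFirst rest).2
end

theorem pv_go_eq (s : List Char) : ∀ (cur : List Char) (acc : List (List Char)),
    PySem.Chars.split₀.go s cur acc =
      acc.reverse ++ (if cur.isEmpty then pvWords s
                      else (cur.reverse ++ (pvFirst s).1) :: (pvFirst s).2) := by
  induction s with
  | nil =>
    intro cur acc
    cases cur <;> simp [PySem.Chars.split₀.go, pvWords, pvFirst]
  | cons c rest ih =>
    intro cur acc
    by_cases h : PySem.Chars.isspace c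
    · cases cur with
      | nil => simp [PySem.Chars.split₀.go, h, ih, pvWords]
      | cons d ds => simp [PySem.Chars.split₀.go, h, ih, pvWords, pvFirst]
    · cases cur with
      | nil => simp [PySem.Chars.split₀.go, h, ih, pvWords, pvFirst]
      | cons d ds => simp [PySem.Chars.split₀.go, h, ih, pvWords, pvFirst]

theorem pv_split_eq (s : List Char) : PySem.Chars.split₀ s = pvWords s := by
  simpa using pv_go_eq s [] []

-- running Source B's loop from a consistent state emits exactly the processed remaining words
theorem pv_run_eq (s : List Char) :
    (∀ (k : Nat) (out : List Char),
        (List.foldl pvStep (out, false, k) s).1 = out ++ pvJoin k (k != 0) (pvWords s))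
  ∧ (∀ (k : Nat) (out : List Char),
        (List.foldl pvStep (out, true, k + 1) s).1
          = out ++ pvProc k (pvFirst s).1 ++ pvJoin (k + 1) true (pvFirst s).2) := by
  induction s with
  | nil =>
    constructor <;> intro k out <;> simp [pvJoin, pvWords, pvFirst, pvProc, pvDV]
  | cons c rest ih =>
    obtain ⟨ih1, ih2⟩ := ih
    constructor
    · intro k out
      by_cases h : PySem.Chars.isspace c
      · simp [List.foldl, pvStep, h, ih1, pvWords]
      · have hs : (k + 1) % 2 = 0 ↔ k % 2 = 1 := by omega
        by_cases hv : c = 'a' ∨ c = 'e' ∨ c = 'i' ∨ c = 'o' ∨ c = 'u' <;>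
          by_cases hk : k % 2 = 1 <;>
          by_cases h0 : k = 0 <;>
          first
            | omega
            | (have hb : (k != 0) = (decide ¬ (k = 0)) := by simp [h0]
               simp [List.foldl, pvStep, h, ih2, pvWords, pvJoin, pvProc, pvDV,
                     hs, hk, hv, h0, hb, List.append_assoc])
    · intro k out
      by_cases h : PySem.Chars.isspace c
      · simp [List.foldl, pvStep, h, ih1, pvFirst, pvProc, pvDV]
      · have hs : (k + 1) % 2 = 0 ↔ k % 2 = 1 := by omega
        by_cases hv : c = 'a' ∨ c = 'e' ∨ c = 'i' ∨ c = 'o' ∨ c = 'u' <;>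
          by_cases hk : k % 2 = 1 <;>
          simp [List.foldl, pvStep, h, ih2, pvFirst, pvProc, pvDV,
                hs, hk, hv, List.append_assoc]

-- A's character loop with an arbitrary accumulator computes pvDV
theorem pv_dv_go (w : List Char) : ∀ (acc : List Char),
    List.foldl (fun new_str ch =>
        if ['a','e','i','o','u'].contains ch then new_str ++ [ch, ch] else new_str ++ [ch]) acc w
      = acc ++ pvDV w := by
  induction w with
  | nil => intro acc; simp [pvDV]
  | cons c cs ih =>
    intro acc
    have hDV : pvDV (c :: cs)
        = (if ['a','e','i','o','u'].contains c then [c, c] else [c]) ++ pvDV cs := by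
      simp [pvDV]
    calc List.foldl (fun new_str ch =>
            if ['a','e','i','o','u'].contains ch then new_str ++ [ch, ch] else new_str ++ [ch])
          acc (c :: cs)
        = List.foldl (fun new_str ch =>
            if ['a','e','i','o','u'].contains ch then new_str ++ [ch, ch] else new_str ++ [ch])
          (if ['a','e','i','o','u'].contains c then acc ++ [c, c] else acc ++ [c]) cs := rfl
      _ = (if ['a','e','i','o','u'].contains c then acc ++ [c, c] else acc ++ [c]) ++ pvDV cs :=
          ih _
      _ = acc ++ ((if ['a','e','i','o','u'].contains c then [c, c] else [c]) ++ pvDV cs) := by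
          split <;> simp
      _ = acc ++ pvDV (c :: cs) := by rw [hDV]

-- A's per-word helper computes pvDV
theorem pv_dv_eq (w : List Char) : double_vowel (String.ofList w) = String.ofList (pvDV w) := by
  unfold double_vowel
  rw [String.toList_ofList, pv_dv_go]
  simp

-- A's indexed map over the word list is the processed word list
theorem pv_a_ren (cws : List (List Char)) : ∀ (p : Nat),
    List.map (fun j : Nat =>
        if (j + p) % 2 = 0 then (List.map String.ofList cws).getD j ""
        else double_vowel ((List.map String.ofList cws).getD j ""))
      (List.range cws.length)
    = List.map String.ofList (pvRen p cws) := by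
  induction cws with
  | nil => intro p; simp [pvRen]
  | cons w rest ih =>
    intro p
    simp only [List.length_cons, List.range_succ_eq_map, List.map_cons, List.map_map, pvRen]
    congr 1
    · by_cases hp : p % 2 = 1
      · simp [pvProc, hp, pv_dv_eq]
      · simp [pvProc, hp]
    · have hsh : ∀ j ∈ List.range rest.length,
          ((fun j : Nat =>
            if (j + p) % 2 = 0 then (String.ofList w :: List.map String.ofList rest).getD j ""
            else double_vowel ((String.ofList w :: List.map String.ofList rest).getD j "")) ∘
              Nat.succ) j =
          (fun j : Nat =>
            if (j + (p + 1)) % 2 = 0 then (List.map String.ofList rest).getD j ""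
            else double_vowel ((List.map String.ofList rest).getD j "")) j := by
        intro j _
        have h1 : (Nat.succ j + p) % 2 = (j + (p + 1)) % 2 := by omega
        simp [Function.comp, h1, Nat.succ_eq_add_one]
      rw [List.map_congr_left hsh, ih (p + 1)]

theorem pv_flat_ren (ps : List (List Char)) : ∀ (k : Nat),
    (pvRen k ps).flatMap (fun w => ' ' :: w) = pvJoin k true ps := by
  induction ps with
  | nil => intro k; simp [pvRen, pvJoin]
  | cons w ws ih => intro k; simp [pvRen, pvJoin, ih]

theorem pv_intercalate_cons (xs : List (List Char)) : ∀ (x : List Char),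
    List.intercalate [' '] (x :: xs) = x ++ xs.flatMap (fun w => ' ' :: w) := by
  induction xs with
  | nil => intro x; simp [List.intercalate]
  | cons y ys ih =>
    intro x
    simp only [List.intercalate, List.intersperse] at *
    simp [ih y]

theorem pv_join_ren (ps : List (List Char)) (k : Nat) :
    List.intercalate [' '] (pvRen k ps) = pvJoin k false ps := by
  cases ps with
  | nil => simp [pvRen, pvJoin, List.intercalate]
  | cons w ws => simp [pvRen, pvJoin, pv_intercalate_cons, pv_flat_ren]

-- ===== VERDICT (by name: the statement is the Claim_ definition above) =====
theorem funny_phrase_spec : Claim_equal_funny_phrase := by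
  intro sentence _
  unfold Spec_funny_phrase funny_phrase funny_phrase_alt
  dsimp only
  -- B side: run the streaming pass
  rw [(pv_run_eq sentence.toList).1 0 []]
  -- A side: fold → map over the index range
  have hA : (fun (acc : List String) i =>
      if PySem.Int.mod i 2 == 0 then acc ++ [PySem.List.pyGetD (PySem.Str.split₀ sentence) i ""]
      else acc ++ [double_vowel (PySem.List.pyGetD (PySem.Str.split₀ sentence) i "")]) =
      (fun acc i => acc ++ [if PySem.Int.mod i 2 == 0 then PySem.List.pyGetD (PySem.Str.split₀ sentence) i ""
        else double_vowel (PySem.List.pyGetD (PySem.Str.split₀ sentence) i "")]) := by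
    funext acc i; split <;> rfl
  rw [hA, PySem.List.foldl_append_singleton_eq_map, List.nil_append,
    PySem.List.len_eq, PySem.List.pyRange_zero_natCast, List.map_map]
  -- pointwise: Int index arithmetic → Nat index arithmetic
  have hpt : ∀ j ∈ List.range (PySem.Str.split₀ sentence).length,
      ((fun i => if PySem.Int.mod i 2 == 0 then PySem.List.pyGetD (PySem.Str.split₀ sentence) i ""
        else double_vowel (PySem.List.pyGetD (PySem.Str.split₀ sentence) i "")) ∘ fun k : Nat => (k : Int)) j
      = (fun j : Nat =>
          if (j + 0) % 2 = 0 then (PySem.Str.split₀ sentence).getD j ""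
          else double_vowel ((PySem.Str.split₀ sentence).getD j "")) j := by
    intro j _
    dsimp only [Function.comp]
    rw [show ((2 : Int)) = ((2 : Nat) : Int) from rfl, PySem.Int.mod_natCast,
      PySem.List.pyGetD_natCast]
    by_cases hj : j % 2 = 0
    · simp [hj]
    · have h2 : ¬ ((2 : Int) ∣ (j : Int)) := by omega
      simp [hj, h2]
  rw [List.map_congr_left hpt]
  -- the word lists agree
  have hws : PySem.Str.split₀ sentence = List.map String.ofList (pvWords sentence.toList) := by
    rw [show PySem.Str.split₀ sentence
        = List.map String.ofList (PySem.Chars.split₀ sentence.toList) from rfl, pv_split_eq]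
  simp only [hws, List.length_map]
  rw [pv_a_ren (pvWords sentence.toList) 0]
  -- join of the processed words = pvJoin
  show PySem.Str.join " " (List.map String.ofList (pvRen 0 (pvWords sentence.toList)))
      = String.ofList (pvJoin 0 (0 != 0) (pvWords sentence.toList))
  unfold PySem.Str.join PySem.Chars.join
  congr 1
  simp only [List.map_map]
  have hid : (List.map (String.toList ∘ String.ofList) (pvRen 0 (pvWords sentence.toList)))
      = pvRen 0 (pvWords sentence.toList) := by
    have hc : (String.toList ∘ String.ofList) = (id : List Char → List Char) := by
      funext w; simp [Function.comp_def]
    rw [hc, List.map_id]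
  rw [hid]
  show List.intercalate " ".toList (pvRen 0 (pvWords sentence.toList))
      = pvJoin 0 false (pvWords sentence.toList)
  rw [show " ".toList = [' '] from rfl, pv_join_ren]
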